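-- pv_equiv track=rewrite | github.com/Burugi/Algorithms | BFS/13549.py | bfs
-- ===== SOURCE A (Python) =====
-- from collections import deque
--
-- def bfs(start, target):
--     max_limit = 100001
--     visited = [-1] * max_limit
--     deque_queue = deque([start])
--     visited[start] = 0
--
--     while deque_queue:
--         current = deque_queue.popleft()
--
--         if current == target:
--             return visited[current]
--
--         for next_pos in (current * 2, current - 1, current + 1): # next_pos의 순서가 중요하다
--             # 반례 4 6 -> 2인지 1인지에 대한 내용, 작은 값을 먼저 처리해야할 것이다.
--             if 0 <= next_pos < max_limit:
--                 if next_pos == current * 2 and visited[next_pos] == -1: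
--                     visited[next_pos] = visited[current]
--                     deque_queue.appendleft(next_pos)
--                 elif (next_pos == current + 1 or next_pos == current - 1) and visited[next_pos] == -1:
--                     visited[next_pos] = visited[current] + 1
--                     deque_queue.append(next_pos)
-- ===== SOURCE B (Python) =====
-- def bfs(start, target):
--     # Plain unweighted BFS on the condensed graph: doubling edges cost 0, so each
--     # dequeued cell's whole doubling chain x, 2x, 4x, ... is claimed at the current
--     # distance by an inner loop, and only the unit-cost +-1 neighbours of the chain
--     # cells are enqueued (ordinary FIFO queue scanned by index, no deque / 0-1 trick).
--     limit = 100001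
--     dist = [-1] * limit
--     dist[start] = 0
--     queue = [start]
--     qi = 0
--     while qi < len(queue):
--         x = queue[qi]
--         qi += 1
--         d = dist[x]
--         y = x
--         while True:
--             if y == target:
--                 return d
--             dbl = y * 2
--             grow = 0 <= dbl < limit and dist[dbl] == -1
--             if grow:
--                 dist[dbl] = d
--             for z in (y - 1, y + 1):
--                 if 0 <= z < limit and dist[z] == -1:
--                     dist[z] = d + 1
--                     queue.append(z)
--             if not grow:
--                 break
--             y = dbl
-- ===== Notes on version B (the rewrite author's own statement) =====
-- stated objective: alternative
-- what changed: Replaces A's 0-1 BFS on a deque (doubling pushed with appendleft, +-1 appended) by a standard unweighted BFS on the condensed graph: a plain FIFO queue scanned by index, whose inner loop claims the whole zero-cost doubling chain x,2x,4x,... at the current distance and enqueues only the unit-cost +-1 neighbours of the chain cells.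
-- outside the precondition, e.g. on bfs(-1, 5): A returns 3, B returns 3; on bfs(-1, -1): A returns 0, B returns 0
import Mathlib
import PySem

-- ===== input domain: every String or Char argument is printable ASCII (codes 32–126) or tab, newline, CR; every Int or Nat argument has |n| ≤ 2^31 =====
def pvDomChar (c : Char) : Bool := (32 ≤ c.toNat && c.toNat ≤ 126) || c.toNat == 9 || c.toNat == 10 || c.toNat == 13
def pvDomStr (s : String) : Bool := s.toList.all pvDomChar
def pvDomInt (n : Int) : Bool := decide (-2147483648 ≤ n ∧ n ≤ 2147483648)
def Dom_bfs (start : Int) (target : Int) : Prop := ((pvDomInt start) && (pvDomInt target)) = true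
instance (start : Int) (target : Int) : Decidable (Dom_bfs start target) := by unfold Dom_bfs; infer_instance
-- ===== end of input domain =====

-- B replaces A's 0-1 BFS on a deque by a plain FIFO BFS on the condensed graph: an
-- inner loop claims the whole zero-cost doubling chain of each dequeued cell and only
-- the unit-cost ±1 neighbours are enqueued. Alternative structure, same cost; the
-- equivalence is proved on the natural domain 0 ≤ start, target ≤ 100000.

-- ===== PORT A =====
-- Python's list `visited` ([-1]*100001, in-bounds reads/writes only under Pre_) is modelled
-- as a HashMap with default -1 (getD _ (-1)); exact for every index the code accesses there.
-- collections.deque is ported as the standard two-list functional queue (front, back with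
-- the back reversed): deque contents = front ++ back.reverse, popleft = head of front
-- (promoting back.reverse when front is empty), appendleft = cons on front, append = cons
-- on back.
-- One step of A's inner `for next_pos in (...)` body on the (visited, front, back) state.
def bfsRelax (current : Int) (np : Int)
    (vq : Std.HashMap Int Int × List Int × List Int) :
    Std.HashMap Int Int × List Int × List Int :=
  if 0 ≤ np ∧ np < 100001 then
    if np = current * 2 ∧ vq.1.getD np (-1) = -1 then
      (vq.1.insert np (vq.1.getD current (-1)), np :: vq.2.1, vq.2.2)
    else if (np = current + 1 ∨ np = current - 1) ∧ vq.1.getD np (-1) = -1 then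
      (vq.1.insert np (vq.1.getD current (-1) + 1), vq.2.1, np :: vq.2.2)
    else vq
  else vq

-- A's `while deque_queue:` loop; fuel bounds the iteration count (each pop either marks
-- new cells or shrinks the queue, so 400000 steps always suffice: see pvPhi below), -1
-- stands for Python's implicit None return on queue exhaustion (excluded by Pre_).
def bfsLoop (fuel : Nat) (visited : Std.HashMap Int Int) (front back : List Int)
    (target : Int) : Int :=
  match fuel with
  | 0 => -1
  | fuel + 1 =>
    match (if front.isEmpty then (back.reverse, ([] : List Int)) else (front, back)) with
    | ([], _) => -1
    | (current :: rest, bk) =>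
      if current = target then visited.getD current (-1)
      else
        let vq := [current * 2, current - 1, current + 1].foldl
          (fun s np => bfsRelax current np s) (visited, rest, bk)
        bfsLoop fuel vq.1 vq.2.1 vq.2.2 target

def bfs (start : Int) (target : Int) : Int :=
  bfsLoop 400000 ((∅ : Std.HashMap Int Int).insert start 0) [start] [] target

-- ===== PORT B =====
-- Python's list `dist` is the same HashMap-with-default model as A's `visited`; the
-- Python FIFO `queue` scanned by index qi is an Array Int read with getD (the loop guard
-- keeps qi in range, so getD is exact), appends are Array.push at the end.
-- One step of B's `for z in (y - 1, y + 1)` body on the (dist, queue) state.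
def chainStep (d : Int) (s : Std.HashMap Int Int × Array Int) (z : Int) :
    Std.HashMap Int Int × Array Int :=
  if 0 ≤ z ∧ z < 100001 ∧ s.1.getD z (-1) = -1 then
    (s.1.insert z (d + 1), s.2.push z)
  else s

-- B's inner `while True:` doubling-chain walk; the Python local `grow` (evaluated before
-- the ±1 marks, on the same map v) becomes the branch condition; `none` signals the
-- `return d` (the caller returns d), `some` the `break` with the updated (dist, queue).
-- Inner fuel: y strictly grows while staying < 100001, so 100002 steps always suffice.
def chainWalk (fuelI : Nat) (v : Std.HashMap Int Int) (y d : Int) (q : Array Int)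
    (t : Int) : Option (Std.HashMap Int Int × Array Int) :=
  match fuelI with
  | 0 => some (v, q)
  | fI + 1 =>
    if y = t then none
    else if 0 ≤ y * 2 ∧ y * 2 < 100001 ∧ v.getD (y * 2) (-1) = -1 then
      let s := [y - 1, y + 1].foldl (chainStep d) (v.insert (y * 2) d, q)
      chainWalk fI s.1 (y * 2) d s.2 t
    else
      some ([y - 1, y + 1].foldl (chainStep d) (v, q))

-- B's outer `while qi < len(queue):` loop; -1 again stands for the implicit None.
def bfs_altLoop (fuelO : Nat) (v : Std.HashMap Int Int) (q : Array Int) (qi : Nat)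
    (t : Int) : Int :=
  match fuelO with
  | 0 => -1
  | f + 1 =>
    if qi < q.size then
      let x := q.getD qi 0
      let d := v.getD x (-1)
      match chainWalk 100002 v x d q t with
      | none => d
      | some (v', q') => bfs_altLoop f v' q' (qi + 1) t
    else -1

def bfs_alt (start : Int) (target : Int) : Int :=
  bfs_altLoop 400000 ((∅ : Std.HashMap Int Int).insert start 0) #[start] 0 target

-- ===== PRECONDITION & SPEC =====
-- Pre_ excludes start ∉ [0,100000] — both programs raise IndexError for start > 100000 or
-- start < -100001, and for the remaining negative starts both values hinge on Python's
-- accidental negative-index wraparound — and target ∉ [0,100000], where both fall off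
-- the loop and return None (not an int).
def Pre_bfs (start : Int) (target : Int) : Prop :=
  0 ≤ start ∧ start ≤ 100000 ∧ 0 ≤ target ∧ target ≤ 100000
instance (start : Int) (target : Int) : Decidable (Pre_bfs start target) := by
  unfold Pre_bfs; infer_instance

def pvWitness_bfs : Int × Int := (4, 6)

def Spec_bfs (start : Int) (target : Int) (out : Int) : Prop := out = bfs_alt start target
instance (start : Int) (target : Int) (out : Int) : Decidable (Spec_bfs start target out) := by
  unfold Spec_bfs; infer_instance

-- ===== CLAIM (what is proved, stated in full; the proofs are below) =====
def Claim_equal_bfs : Prop := ∀ (start : Int) (target : Int), Dom_bfs start target →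
  Pre_bfs start target → Spec_bfs start target (bfs start target)

-- ===== LEMMAS AND PROOFS =====

-- number of unvisited board cells; 2·pvUnm + queue length is a strictly decreasing
-- measure of A's loop, which bounds its iteration count (fuel).
def pvUnm (v : Std.HashMap Int Int) : Nat :=
  ((Finset.range 100001).filter (fun n => v.getD ((n : Nat) : Int) (-1) = -1)).card

def pvPhi (v : Std.HashMap Int Int) (fr bk : List Int) : Nat :=
  fr.length + bk.length + 2 * pvUnm v

-- queue invariant: every enqueued cell is on the board and already marked (dist ≥ 0).
def pvInv (v : Std.HashMap Int Int) (l : List Int) : Prop :=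
  ∀ z ∈ l, 0 ≤ z ∧ z < 100001 ∧ 0 ≤ v.getD z (-1)

theorem pvUnm_insert {v : Std.HashMap Int Int} {j w : Int}
    (h0 : 0 ≤ j) (h1 : j < 100001) (hj : v.getD j (-1) = -1) (hw : w ≠ -1) :
    pvUnm (v.insert j w) + 1 = pvUnm v := by
  unfold pvUnm
  have hmem : j.toNat ∈ (Finset.range 100001).filter
      (fun n => v.getD ((n : Nat) : Int) (-1) = -1) := by
    simp only [Finset.mem_filter, Finset.mem_range]
    constructor
    · omega
    · rw [Int.toNat_of_nonneg h0]; exact hj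
  have hset : (Finset.range 100001).filter
        (fun n => (v.insert j w).getD ((n : Nat) : Int) (-1) = -1)
      = ((Finset.range 100001).filter
        (fun n => v.getD ((n : Nat) : Int) (-1) = -1)).erase j.toNat := by
    ext i
    simp only [Finset.mem_filter, Finset.mem_range, Finset.mem_erase,
      Std.HashMap.getD_insert, beq_iff_eq]
    by_cases e : j = ((i : Nat) : Int)
    · rw [if_pos e]
      have hij : i = j.toNat := by omega
      subst hij
      simp [hw]
    · rw [if_neg e]
      have hne : i ≠ j.toNat := fun h => e (by omega)
      exact ⟨fun h => ⟨hne, h⟩, fun h => h.2⟩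
  rw [hset, Finset.card_erase_of_mem hmem]
  have hpos : 0 < ((Finset.range 100001).filter
      (fun n => v.getD ((n : Nat) : Int) (-1) = -1)).card :=
    Finset.card_pos.mpr ⟨j.toNat, hmem⟩
  omega

-- insert at a different key leaves getD unchanged.
theorem pvGetD_ins_ne {v : Std.HashMap Int Int} {j w a : Int} (h : j ≠ a) :
    (v.insert j w).getD a (-1) = v.getD a (-1) := by
  rw [Std.HashMap.getD_insert]
  simp [h]

-- A's relax on next_pos = current*2 always lands in the doubling branch.
theorem pvRelax_dbl (v : Std.HashMap Int Int) (fr bk : List Int) (y : Int) :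
    bfsRelax y (y * 2) (v, fr, bk) =
      if 0 ≤ y * 2 ∧ y * 2 < 100001 ∧ v.getD (y * 2) (-1) = -1 then
        (v.insert (y * 2) (v.getD y (-1)), y * 2 :: fr, bk)
      else (v, fr, bk) := by
  unfold bfsRelax
  dsimp only
  by_cases hb : 0 ≤ y * 2 ∧ y * 2 < 100001
  · rw [if_pos hb]
    by_cases hv : v.getD (y * 2) (-1) = -1
    · rw [if_pos ⟨rfl, hv⟩, if_pos ⟨hb.1, hb.2, hv⟩]
    · rw [if_neg (fun h => hv h.2), if_neg (fun h => hv h.2), if_neg (fun h => hv h.2.2)]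
  · rw [if_neg hb, if_neg (fun h => hb ⟨h.1, h.2.1⟩)]

-- A's relax on next_pos = current - 1 always lands in the `elif` arm (in range, y - 1 = 2y
-- would force y = -1 < 0).
theorem pvRelax_sub1 (v : Std.HashMap Int Int) (fr bk : List Int) (x : Int) :
    bfsRelax x (x - 1) (v, fr, bk) =
      if 0 ≤ x - 1 ∧ x - 1 < 100001 ∧ v.getD (x - 1) (-1) = -1 then
        (v.insert (x - 1) (v.getD x (-1) + 1), fr, (x - 1) :: bk)
      else (v, fr, bk) := by
  unfold bfsRelax
  dsimp only
  by_cases hb : 0 ≤ x - 1 ∧ x - 1 < 100001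
  · rw [if_pos hb]
    by_cases hv : v.getD (x - 1) (-1) = -1
    · rw [if_neg (fun h => absurd h.1 (by omega)), if_pos ⟨Or.inr rfl, hv⟩,
        if_pos ⟨hb.1, hb.2, hv⟩]
    · rw [if_neg (fun h => hv h.2), if_neg (fun h => hv h.2), if_neg (fun h => hv h.2.2)]
  · rw [if_neg hb, if_neg (fun h => hb ⟨h.1, h.2.1⟩)]

-- … and on next_pos = current + 1 likewise, provided cell x + 1 is already visited when
-- x + 1 = x * 2 (i.e. x = 1), which kills the doubling arm there too.
theorem pvRelax_add1 (v : Std.HashMap Int Int) (fr bk : List Int) (x : Int)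
    (hkill : x + 1 = x * 2 → ¬ v.getD (x + 1) (-1) = -1) :
    bfsRelax x (x + 1) (v, fr, bk) =
      if 0 ≤ x + 1 ∧ x + 1 < 100001 ∧ v.getD (x + 1) (-1) = -1 then
        (v.insert (x + 1) (v.getD x (-1) + 1), fr, (x + 1) :: bk)
      else (v, fr, bk) := by
  unfold bfsRelax
  dsimp only
  by_cases hb : 0 ≤ x + 1 ∧ x + 1 < 100001
  · rw [if_pos hb]
    by_cases hv : v.getD (x + 1) (-1) = -1
    · rw [if_neg (fun h => hkill h.1 hv), if_pos ⟨Or.inl rfl, hv⟩,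
        if_pos ⟨hb.1, hb.2, hv⟩]
    · rw [if_neg (fun h => hv h.2), if_neg (fun h => hv h.2), if_neg (fun h => hv h.2.2)]
  · rw [if_neg hb, if_neg (fun h => hb ⟨h.1, h.2.1⟩)]

-- the shared ±1 part of one chain step: A's two remaining relaxes and B's chainStep fold
-- compute the SAME map V and mirrored queues (A conses on back, B appends; L is the list
-- of freshly enqueued cells in order).
theorem pvTwo (v1 : Std.HashMap Int Int) (fr bk : List Int) (q : Array Int) (y d : Int)
    (hy0 : 0 ≤ y) (hyv : v1.getD y (-1) = d) (hd0 : 0 ≤ d)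
    (hkill : y + 1 = y * 2 → ¬ v1.getD (y + 1) (-1) = -1) :
    ∃ (V : Std.HashMap Int Int) (L : List Int) (Q : Array Int),
      List.foldl (fun s np => bfsRelax y np s) (v1, fr, bk) [y - 1, y + 1]
        = (V, fr, L.reverse ++ bk) ∧
      List.foldl (chainStep d) (v1, q) [y - 1, y + 1] = (V, Q) ∧
      Q.toList = q.toList ++ L ∧
      V.getD (y * 2) (-1) = v1.getD (y * 2) (-1) ∧
      (∀ z, 0 ≤ v1.getD z (-1) → 0 ≤ V.getD z (-1)) ∧
      (∀ z ∈ L, 0 ≤ z ∧ z < 100001 ∧ V.getD z (-1) = d + 1) ∧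
      pvUnm V + L.length = pvUnm v1 := by
  have hsub : y - 1 ≠ y * 2 := by omega
  have hd1 : (d + 1 : Int) ≠ -1 := by omega
  simp only [List.foldl_cons, List.foldl_nil]
  rw [pvRelax_sub1 v1 fr bk y]
  by_cases hc2 : 0 ≤ y - 1 ∧ y - 1 < 100001 ∧ v1.getD (y - 1) (-1) = -1
  · rw [if_pos hc2, hyv]
    have hB1 : chainStep d (v1, q) (y - 1) = (v1.insert (y - 1) (d + 1), q.push (y - 1)) := by
      unfold chainStep; dsimp only; rw [if_pos hc2]
    rw [hB1]
    have hv2y : (v1.insert (y - 1) (d + 1)).getD y (-1) = d := by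
      rw [pvGetD_ins_ne (by omega)]; exact hyv
    have hkill2 : y + 1 = y * 2 → ¬ (v1.insert (y - 1) (d + 1)).getD (y + 1) (-1) = -1 := by
      intro he
      rw [pvGetD_ins_ne (by omega)]
      exact hkill he
    rw [pvRelax_add1 (v1.insert (y - 1) (d + 1)) fr ((y - 1) :: bk) y hkill2, hv2y]
    by_cases hc3 : 0 ≤ y + 1 ∧ y + 1 < 100001 ∧
        (v1.insert (y - 1) (d + 1)).getD (y + 1) (-1) = -1
    · rw [if_pos hc3]
      have hB2 : chainStep d (v1.insert (y - 1) (d + 1), q.push (y - 1)) (y + 1)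
          = ((v1.insert (y - 1) (d + 1)).insert (y + 1) (d + 1),
             (q.push (y - 1)).push (y + 1)) := by
        unfold chainStep; dsimp only; rw [if_pos hc3]
      rw [hB2]
      have hne32 : y + 1 ≠ y * 2 := fun he => hkill2 he hc3.2.2
      refine ⟨(v1.insert (y - 1) (d + 1)).insert (y + 1) (d + 1), [y - 1, y + 1],
        (q.push (y - 1)).push (y + 1), by simp, by simp, by simp, ?_, ?_, ?_, ?_⟩
      · rw [pvGetD_ins_ne hne32, pvGetD_ins_ne hsub]
      · intro z hz
        by_cases e1 : y + 1 = z
        · rw [← e1, Std.HashMap.getD_insert_self]; omega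
        · rw [pvGetD_ins_ne e1]
          by_cases e2 : y - 1 = z
          · rw [← e2, Std.HashMap.getD_insert_self]; omega
          · rw [pvGetD_ins_ne e2]; exact hz
      · intro z hz
        simp only [List.mem_cons, List.not_mem_nil, or_false] at hz
        rcases hz with rfl | rfl
        · exact ⟨hc2.1, hc2.2.1, by rw [pvGetD_ins_ne (by omega), Std.HashMap.getD_insert_self]⟩
        · exact ⟨hc3.1, hc3.2.1, by rw [Std.HashMap.getD_insert_self]⟩
      · have h1 : pvUnm (v1.insert (y - 1) (d + 1)) + 1 = pvUnm v1 :=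
          pvUnm_insert hc2.1 hc2.2.1 hc2.2.2 hd1
        have h2 : pvUnm ((v1.insert (y - 1) (d + 1)).insert (y + 1) (d + 1)) + 1
            = pvUnm (v1.insert (y - 1) (d + 1)) :=
          pvUnm_insert hc3.1 hc3.2.1 hc3.2.2 hd1
        simp only [List.length_cons, List.length_nil]
        omega
    · rw [if_neg hc3]
      have hB2 : chainStep d (v1.insert (y - 1) (d + 1), q.push (y - 1)) (y + 1)
          = (v1.insert (y - 1) (d + 1), q.push (y - 1)) := by
        unfold chainStep; dsimp only; rw [if_neg hc3]
      rw [hB2]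
      refine ⟨v1.insert (y - 1) (d + 1), [y - 1], q.push (y - 1),
        by simp, by simp, by simp, ?_, ?_, ?_, ?_⟩
      · rw [pvGetD_ins_ne hsub]
      · intro z hz
        by_cases e2 : y - 1 = z
        · rw [← e2, Std.HashMap.getD_insert_self]; omega
        · rw [pvGetD_ins_ne e2]; exact hz
      · intro z hz
        simp only [List.mem_cons, List.not_mem_nil, or_false] at hz
        rcases hz with rfl
        exact ⟨hc2.1, hc2.2.1, by rw [Std.HashMap.getD_insert_self]⟩
      · have h1 : pvUnm (v1.insert (y - 1) (d + 1)) + 1 = pvUnm v1 :=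
          pvUnm_insert hc2.1 hc2.2.1 hc2.2.2 hd1
        simp only [List.length_cons, List.length_nil]
        omega
  · rw [if_neg hc2]
    have hB1 : chainStep d (v1, q) (y - 1) = (v1, q) := by
      unfold chainStep; dsimp only; rw [if_neg hc2]
    rw [hB1]
    rw [pvRelax_add1 v1 fr bk y hkill, hyv]
    by_cases hc3 : 0 ≤ y + 1 ∧ y + 1 < 100001 ∧ v1.getD (y + 1) (-1) = -1
    · rw [if_pos hc3]
      have hB2 : chainStep d (v1, q) (y + 1) = (v1.insert (y + 1) (d + 1), q.push (y + 1)) := by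
        unfold chainStep; dsimp only; rw [if_pos hc3]
      rw [hB2]
      have hne32 : y + 1 ≠ y * 2 := fun he => hkill he hc3.2.2
      refine ⟨v1.insert (y + 1) (d + 1), [y + 1], q.push (y + 1),
        by simp, by simp, by simp, ?_, ?_, ?_, ?_⟩
      · rw [pvGetD_ins_ne hne32]
      · intro z hz
        by_cases e1 : y + 1 = z
        · rw [← e1, Std.HashMap.getD_insert_self]; omega
        · rw [pvGetD_ins_ne e1]; exact hz
      · intro z hz
        simp only [List.mem_cons, List.not_mem_nil, or_false] at hz
        rcases hz with rfl
        exact ⟨hc3.1, hc3.2.1, by rw [Std.HashMap.getD_insert_self]⟩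
      · have h2 : pvUnm (v1.insert (y + 1) (d + 1)) + 1 = pvUnm v1 :=
          pvUnm_insert hc3.1 hc3.2.1 hc3.2.2 hd1
        simp only [List.length_cons, List.length_nil]
        omega
    · rw [if_neg hc3]
      have hB2 : chainStep d (v1, q) (y + 1) = (v1, q) := by
        unfold chainStep; dsimp only; rw [if_neg hc3]
      rw [hB2]
      refine ⟨v1, [], q, by simp, by simp, by simp, rfl, fun z hz => hz, ?_, by simp⟩
      intro z hz
      simp at hz

-- chain simulation: A's consecutive pops of the doubling chain y, 2y, 4y, … equal B's
-- inner chainWalk, relating A's (front, back) deque halves to B's single queue.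
theorem pvChain (fuelI : Nat) : ∀ (fuelA : Nat) (v : Std.HashMap Int Int) (y d : Int)
    (rest bk : List Int) (q : Array Int) (qi : Nat) (t : Int),
    0 ≤ y → y < 100001 → v.getD y (-1) = d → 0 ≤ d →
    rest ++ bk.reverse = q.toList.drop qi → qi ≤ q.toList.length → pvInv v q.toList →
    100002 - y.toNat ≤ fuelI → pvPhi v (y :: rest) bk ≤ fuelA →
    (chainWalk fuelI v y d q t = none → bfsLoop fuelA v (y :: rest) bk t = d) ∧
    (∀ v' q', chainWalk fuelI v y d q t = some (v', q') →
      ∃ (fuelA' : Nat) (bk' : List Int),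
        bfsLoop fuelA v (y :: rest) bk t = bfsLoop fuelA' v' rest bk' t ∧
        rest ++ bk'.reverse = q'.toList.drop qi ∧ qi ≤ q'.toList.length ∧
        pvInv v' q'.toList ∧
        pvPhi v' rest bk' ≤ fuelA' ∧
        pvPhi v' rest bk' + 1 ≤ pvPhi v (y :: rest) bk) := by
  induction fuelI with
  | zero =>
    intro fuelA v y d rest bk q qi t hy0 hy1 hd hd0 hq hqi hinv hfI hfA
    exact absurd hfI (by omega)
  | succ fI ih =>
    intro fuelA v y d rest bk q qi t hy0 hy1 hd hd0 hq hqi hinv hfI hfA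
    have hfA1 : 1 ≤ fuelA := by
      refine le_trans ?_ hfA
      unfold pvPhi
      simp only [List.length_cons]
      omega
    obtain ⟨fA, rfl⟩ : ∃ fA, fuelA = fA + 1 := ⟨fuelA - 1, by omega⟩
    by_cases hyt : y = t
    · subst hyt
      constructor
      · intro _
        simp [bfsLoop, hd]
      · intro v' q' hcw
        simp [chainWalk] at hcw
    · by_cases hc1 : 0 ≤ y * 2 ∧ y * 2 < 100001 ∧ v.getD (y * 2) (-1) = -1
      · -- the doubling edge fires: the chain continues with 2y
        have hyne : y ≠ 0 := by
          intro e
          have h2 := hc1.2.2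
          rw [e] at h2
          norm_num at h2
          rw [e] at hd
          rw [hd] at h2
          omega
        have hv1y : (v.insert (y * 2) d).getD y (-1) = d := by
          rw [pvGetD_ins_ne (by omega)]
          exact hd
        have hkill1 : y + 1 = y * 2 → ¬ (v.insert (y * 2) d).getD (y + 1) (-1) = -1 := by
          intro he
          rw [he, Std.HashMap.getD_insert_self]
          omega
        obtain ⟨V, L, Q, hfoldA, hfoldB, hQ, hV2y, hVmono, hVL, hVunm⟩ :=
          pvTwo (v.insert (y * 2) d) (y * 2 :: rest) bk q y d hy0 hv1y hd0 hkill1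
        simp only [List.foldl_cons, List.foldl_nil] at hfoldA
        have hA : bfsLoop (fA + 1) v (y :: rest) bk t
            = bfsLoop fA V (y * 2 :: rest) (L.reverse ++ bk) t := by
          simp only [bfsLoop, List.isEmpty_cons, Bool.false_eq_true, if_false,
            if_neg hyt, List.foldl_cons, List.foldl_nil]
          rw [pvRelax_dbl v rest bk y, if_pos hc1, hd, hfoldA]
        have hBW : chainWalk (fI + 1) v y d q t = chainWalk fI V (y * 2) d Q t := by
          simp only [chainWalk, if_neg hyt, if_pos hc1]
          rw [hfoldB]
        have hd' : V.getD (y * 2) (-1) = d := by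
          rw [hV2y, Std.HashMap.getD_insert_self]
        have hq' : rest ++ (L.reverse ++ bk).reverse = Q.toList.drop qi := by
          rw [hQ, List.drop_append_of_le_length hqi, ← hq]
          simp
        have hqi' : qi ≤ Q.toList.length := by
          rw [hQ]
          simp only [List.length_append]
          omega
        have hinv' : pvInv V Q.toList := by
          intro z hz
          rw [hQ] at hz
          rcases List.mem_append.1 hz with hz | hz
          · obtain ⟨h1, h2, h3⟩ := hinv z hz
            refine ⟨h1, h2, hVmono z ?_⟩
            by_cases e : y * 2 = z
            · rw [← e, Std.HashMap.getD_insert_self]; omega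
            · rw [pvGetD_ins_ne e]; exact h3
          · obtain ⟨h1, h2, h3⟩ := hVL z hz
            exact ⟨h1, h2, by rw [h3]; omega⟩
        have hu1 : pvUnm (v.insert (y * 2) d) + 1 = pvUnm v :=
          pvUnm_insert hc1.1 hc1.2.1 hc1.2.2 (by omega)
        have hPhi : pvPhi V (y * 2 :: rest) (L.reverse ++ bk) + 1 ≤ pvPhi v (y :: rest) bk := by
          unfold pvPhi
          simp only [List.length_cons, List.length_append, List.length_reverse]
          omega
        obtain ⟨ihn, ihs⟩ := ih fA V (y * 2) d rest (L.reverse ++ bk) Q qi t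
          hc1.1 hc1.2.1 hd' hd0 hq' hqi' hinv' (by omega) (by omega)
        constructor
        · intro hnone
          rw [hBW] at hnone
          rw [hA]
          exact ihn hnone
        · intro v' q' hsome
          rw [hBW] at hsome
          obtain ⟨fuelA', bk', heq, h1, h2, h3, h4, h5⟩ := ihs v' q' hsome
          exact ⟨fuelA', bk', by rw [hA]; exact heq, h1, h2, h3, h4, by omega⟩
      · -- no doubling: the chain ends after the ±1 marks
        have hkill0 : y + 1 = y * 2 → ¬ v.getD (y + 1) (-1) = -1 := by
          intro he hv
          rw [he] at hv
          exact hc1 ⟨by omega, by omega, hv⟩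
        obtain ⟨V, L, Q, hfoldA, hfoldB, hQ, hV2y, hVmono, hVL, hVunm⟩ :=
          pvTwo v rest bk q y d hy0 hd hd0 hkill0
        simp only [List.foldl_cons, List.foldl_nil] at hfoldA
        have hA : bfsLoop (fA + 1) v (y :: rest) bk t
            = bfsLoop fA V rest (L.reverse ++ bk) t := by
          simp only [bfsLoop, List.isEmpty_cons, Bool.false_eq_true, if_false,
            if_neg hyt, List.foldl_cons, List.foldl_nil]
          rw [pvRelax_dbl v rest bk y, if_neg hc1, hfoldA]
        have hBW : chainWalk (fI + 1) v y d q t = some (V, Q) := by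
          simp only [chainWalk, if_neg hyt, if_neg hc1]
          rw [hfoldB]
        have hq' : rest ++ (L.reverse ++ bk).reverse = Q.toList.drop qi := by
          rw [hQ, List.drop_append_of_le_length hqi, ← hq]
          simp
        have hqi' : qi ≤ Q.toList.length := by
          rw [hQ]
          simp only [List.length_append]
          omega
        have hinv' : pvInv V Q.toList := by
          intro z hz
          rw [hQ] at hz
          rcases List.mem_append.1 hz with hz | hz
          · obtain ⟨h1, h2, h3⟩ := hinv z hz
            exact ⟨h1, h2, hVmono z h3⟩
          · obtain ⟨h1, h2, h3⟩ := hVL z hz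
            exact ⟨h1, h2, by rw [h3]; omega⟩
        have hPhi : pvPhi V rest (L.reverse ++ bk) + 1 ≤ pvPhi v (y :: rest) bk := by
          unfold pvPhi
          simp only [List.length_cons, List.length_append, List.length_reverse]
          omega
        constructor
        · intro hnone
          rw [hBW] at hnone
          cases hnone
        · intro v' q' hsome
          rw [hBW] at hsome
          simp only [Option.some.injEq, Prod.mk.injEq] at hsome
          obtain ⟨rfl, rfl⟩ := hsome
          exact ⟨fA, L.reverse ++ bk, hA, hq', hqi', hinv', by omega, hPhi⟩

-- a deque whose front is empty behaves as its promoted back.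
theorem pvPromote (f : Nat) (v : Std.HashMap Int Int) (bk : List Int) (t : Int) :
    bfsLoop f v [] bk t = bfsLoop f v bk.reverse [] t := by
  cases f with
  | zero => rfl
  | succ f =>
    cases hbk : bk.reverse with
    | nil => simp [bfsLoop, hbk]
    | cons a l => simp [bfsLoop, hbk]

-- outer simulation: A's whole loop equals B's outer loop.
theorem pvOuter (fuelO : Nat) : ∀ (fuelA : Nat) (v : Std.HashMap Int Int)
    (front bk : List Int) (q : Array Int) (qi : Nat) (t : Int),
    front ++ bk.reverse = q.toList.drop qi → qi ≤ q.toList.length → pvInv v q.toList →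
    pvPhi v front bk ≤ fuelA → pvPhi v front bk ≤ fuelO →
    bfsLoop fuelA v front bk t = bfs_altLoop fuelO v q qi t := by
  induction fuelO with
  | zero =>
    intro fuelA v front bk q qi t hq hqi hinv hfA hfO
    unfold pvPhi at hfO
    have hf : front = [] := List.eq_nil_of_length_eq_zero (by omega)
    have hb : bk = [] := List.eq_nil_of_length_eq_zero (by omega)
    subst hf hb
    cases fuelA with
    | zero => rfl
    | succ fA => simp [bfsLoop, bfs_altLoop]
  | succ fO ih =>
    intro fuelA v front bk q qi t hq hqi hinv hfA hfO
    by_cases hqlt : qi < q.size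
    · have hqlt' : qi < q.toList.length := by
        rw [Array.length_toList]
        exact hqlt
      obtain ⟨x, r, hxr⟩ : ∃ x r, q.toList.drop qi = x :: r := by
        cases h : q.toList.drop qi with
        | nil =>
          exfalso
          have := List.drop_eq_nil_iff.mp h
          omega
        | cons a l => exact ⟨a, l, rfl⟩
      have hxq : x ∈ q.toList :=
        List.mem_of_mem_drop (by rw [hxr]; exact List.mem_cons_self)
      obtain ⟨hx0, hx1, hxd⟩ := hinv x hxq
      have hr : r = q.toList.drop (qi + 1) := by
        rw [← List.tail_drop, hxr, List.tail_cons]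
      have hgetD : q.getD qi 0 = x := by
        have h0 : (q.toList.drop qi)[0]? = some x := by rw [hxr]; rfl
        rw [List.getElem?_drop] at h0
        simp only [Nat.add_zero] at h0
        rw [Array.getD_eq_getD_getElem?, ← Array.getElem?_toList, h0]
        rfl
      rw [hxr] at hq
      have hlen := congrArg List.length hq
      simp only [List.length_append, List.length_reverse, List.length_cons] at hlen
      have hΦpos : 1 ≤ pvPhi v front bk := by
        unfold pvPhi
        omega
      obtain ⟨fA, rfl⟩ : ∃ fA, fuelA = fA + 1 := ⟨fuelA - 1, by omega⟩
      have key : ∀ (rest2 bk2 : List Int), rest2 ++ bk2.reverse = r →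
          pvPhi v (x :: rest2) bk2 = pvPhi v front bk →
          bfsLoop (fA + 1) v (x :: rest2) bk2 t = bfs_altLoop (fO + 1) v q qi t := by
        intro rest2 bk2 hq2 hPeq
        obtain ⟨ihn, ihs⟩ := pvChain 100002 (fA + 1) v x (v.getD x (-1)) rest2 bk2 q
          (qi + 1) t hx0 hx1 rfl hxd (by rw [hq2, hr]) (by omega) hinv (by omega)
          (by rw [hPeq]; exact hfA)
        have hBalt : bfs_altLoop (fO + 1) v q qi t =
            (match chainWalk 100002 v x (v.getD x (-1)) q t with
            | none => v.getD x (-1)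
            | some (v', q') => bfs_altLoop fO v' q' (qi + 1) t) := by
          simp only [bfs_altLoop, if_pos hqlt, hgetD]
        cases hcw : chainWalk 100002 v x (v.getD x (-1)) q t with
        | none =>
          rw [hBalt, hcw]
          exact ihn hcw
        | some p =>
          obtain ⟨v', q'⟩ := p
          obtain ⟨fuelA', bk', heq, h1, h2, h3, h4, h5⟩ := ihs v' q' hcw
          rw [hBalt, hcw, heq]
          exact ih fuelA' v' rest2 bk' q' (qi + 1) t h1 h2 h3 h4 (by omega)
      cases front with
      | nil =>
        have hbkr : bk.reverse = x :: r := by simpa using hq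
        rw [pvPromote (fA + 1) v bk t, hbkr]
        refine key r [] (by simp) ?_
        unfold pvPhi
        have : bk.length = r.length + 1 := by
          rw [← List.length_reverse, hbkr, List.length_cons]
        simp [this]
      | cons c f' =>
        simp only [List.cons_append, List.cons.injEq] at hq
        obtain ⟨rfl, hq⟩ := hq
        refine key f' bk hq ?_
        rfl
    · have hdrop : q.toList.drop qi = [] := by
        refine List.drop_eq_nil_iff.mpr ?_
        rw [Array.length_toList]
        omega
      rw [hdrop] at hq
      have hf : front = [] := by
        cases front with
        | nil => rfl
        | cons a l => simp at hq
      subst hf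
      have hb : bk = [] := by
        simpa using hq
      subst hb
      cases fuelA with
      | zero => simp [bfsLoop, bfs_altLoop, hqlt]
      | succ fA => simp [bfsLoop, bfs_altLoop, hqlt]

-- ===== VERDICT (by name: the statement is the Claim_ definition above) =====
theorem bfs_spec : Claim_equal_bfs := by
  intro start target _ hpre
  obtain ⟨hs0, hs1, _, _⟩ := hpre
  unfold Spec_bfs bfs bfs_alt
  refine pvOuter 400000 400000 _ [start] [] #[start] 0 target (by simp) (by simp) ?_ ?_ ?_
  · intro z hz
    simp only [List.mem_singleton] at hz
    subst hz
    refine ⟨hs0, by omega, ?_⟩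
    rw [Std.HashMap.getD_insert_self]
  · have hb : pvUnm ((∅ : Std.HashMap Int Int).insert start 0) ≤ 100001 := by
      unfold pvUnm
      exact le_trans (Finset.card_filter_le _ _) (by simp)
    unfold pvPhi
    simp only [List.length_cons, List.length_nil]
    omega
  · have hb : pvUnm ((∅ : Std.HashMap Int Int).insert start 0) ≤ 100001 := by
      unfold pvUnm
      exact le_trans (Finset.card_filter_le _ _) (by simp)
    unfold pvPhi
    simp only [List.length_cons, List.length_nil]
    omega
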